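-- pv_equiv track=rewrite | github.com/MuhammadHaaris278/EHR---Context-Aware-Suggestions | app/llm_pipeline.py | _extract_mistral_followup
-- ===== SOURCE A (Python) =====
-- from typing import Dict, List, Optional, Any, Tuple
--
-- def _extract_mistral_followup(content: List[str]) -> List[str]:
--     """Extract follow-up recommendations from Mistral AI with better parsing."""
--     followup_items = []
--     current_item = ""
--
--     for line in content:
--         if not line:
--             continue
--
--         # Check if this starts a new follow-up item
--         if (line.startswith(('-', '•', '*')) or
--             any(char.isdigit() and char in line[:5] for char in "12345") or
--             line.endswith(':') or
--             any(keyword in line.lower() for keyword in ["referral", "appointment", "follow", "return", "schedule", "monitor"])):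
--
--             # Save previous item
--             if current_item and len(current_item) > 15:
--                 followup_items.append(current_item.strip())
--
--             # Start new item
--             current_item = line.lstrip('- • * 1234567890. ')
--         else:
--             # Continue current item
--             if current_item:
--                 current_item += " " + line
--             else:
--                 current_item = line
--
--     # Add the last item
--     if current_item and len(current_item) > 15:
--         followup_items.append(current_item.strip())
--
--     return followup_items[:8]  # Limit to 8 items
-- ===== SOURCE B (Python) =====
-- from typing import Dict, List, Optional, Any, Tuple
--
-- _LSTRIP = '- • * 1234567890. '
-- _KEYWORDS = ("referral", "appointment", "follow", "return", "schedule", "monitor")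
--
--
-- def _is_header(line: str) -> bool:
--     """A line that starts a new follow-up item."""
--     low = line.lower()
--     return (line.startswith(('-', '•', '*'))
--             or any(ch.isdigit() and ch in line[:5] for ch in "12345")
--             or line.endswith(':')
--             or any(k in low for k in _KEYWORDS))
--
--
-- def _extract_mistral_followup(content: List[str]) -> List[str]:
--     """Two-pass: group non-empty lines into segments at header lines, then emit."""
--     lines = [l for l in content if l]
--     n = len(lines)
--     segments = []
--     i = 0
--     if n and not _is_header(lines[0]):
--         j = 0
--         while j < n and not _is_header(lines[j]):
--             j += 1
--         segments.append(lines[0:j])  # leading non-header group: first line kept raw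
--         i = j
--     while i < n:
--         j = i + 1
--         while j < n and not _is_header(lines[j]):
--             j += 1
--         segments.append([lines[i].lstrip(_LSTRIP)] + lines[i + 1:j])
--         i = j
--     out = []
--     for seg in segments:
--         text = ' '.join(p for p in seg if p)
--         if len(text) > 15:
--             out.append(text.strip())
--     return out[:8]
-- ===== Notes on version B (the rewrite author's own statement) =====
-- stated objective: alternative
-- what changed: Replaces A's single-pass string accumulator with flush-on-header by a two-pass design: filter empty lines, split into segments at header lines (via an extracted is_header predicate and index scans), then join/measure/emit each segment.
import Mathlib
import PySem

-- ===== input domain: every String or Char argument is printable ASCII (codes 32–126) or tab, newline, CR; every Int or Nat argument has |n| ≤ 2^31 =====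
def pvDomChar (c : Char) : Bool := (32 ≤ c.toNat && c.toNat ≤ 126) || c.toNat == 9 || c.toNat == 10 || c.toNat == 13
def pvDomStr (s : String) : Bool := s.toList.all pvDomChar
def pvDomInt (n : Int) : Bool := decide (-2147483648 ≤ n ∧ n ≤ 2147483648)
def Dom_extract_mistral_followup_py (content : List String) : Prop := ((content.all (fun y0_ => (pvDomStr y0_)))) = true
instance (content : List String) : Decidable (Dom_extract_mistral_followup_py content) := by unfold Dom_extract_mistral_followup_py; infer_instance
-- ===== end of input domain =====

-- B replaces A's single-pass accumulator (flush on header) by a two-pass design: filter empty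
-- lines, split into segments at header lines, then join/measure/emit each segment (objective:
-- alternative decomposition, same cost).

-- exact port of str.lstrip('- • * 1234567890. '): drop leading chars belonging to the set
def pyLstripItemChars (cs : List Char) : List Char :=
  cs.dropWhile (fun c => c ∈ "- • * 1234567890. ".toList)

-- ===== PORT A =====
def extract_mistral_followup_py (content : List String) : List String :=
  let kws : List (List Char) :=
    ["referral", "appointment", "follow", "return", "schedule", "monitor"].map String.toList
  let st := content.foldl
    (fun (st : List (List Char) × List Char) (line0 : String) =>
      let line := line0.toList
      if line = [] then st
      else
        let items := st.1
        let cur := st.2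
        if PySem.Chars.startswith line ['-'] || PySem.Chars.startswith line ['•'] ||
             PySem.Chars.startswith line ['*'] ||
           "12345".toList.any (fun ch =>
             PySem.Chars.isdigit ch && PySem.Chars.isIn [ch] (PySem.Chars.slice line none (some 5))) ||
           PySem.Chars.endswith line [':'] ||
           kws.any (fun k => PySem.Chars.isIn k (PySem.Chars.lower line))
        then
          ((if cur ≠ [] ∧ 15 < PySem.Chars.len cur then items ++ [PySem.Chars.strip cur] else items),
           pyLstripItemChars line)
        else
          (items, if cur ≠ [] then cur ++ ' ' :: line else line))
    ([], [])
  let items := if st.2 ≠ [] ∧ 15 < PySem.Chars.len st.2 then st.1 ++ [PySem.Chars.strip st.2] else st.1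
  (items.take 8).map (fun cs => String.mk cs)

-- ===== PORT B =====
-- Source B's _is_header: the four header conditions of the task
def isHeaderLineB (line : List Char) : Bool :=
  let low := PySem.Chars.lower line
  PySem.Chars.startswith line ['-'] || PySem.Chars.startswith line ['•'] ||
    PySem.Chars.startswith line ['*'] ||
  "12345".toList.any (fun ch =>
    PySem.Chars.isdigit ch && PySem.Chars.isIn [ch] (PySem.Chars.slice line none (some 5))) ||
  PySem.Chars.endswith line [':'] ||
  (["referral", "appointment", "follow", "return", "schedule", "monitor"].map String.toList).any
    (fun k => PySem.Chars.isIn k low)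

-- Source B's inner `while j < n and not _is_header(lines[j]): j += 1` index scan, as the run it cuts off
def spanNonHeaderB : List (List Char) → List (List Char) × List (List Char)
  | [] => ([], [])
  | l :: ls =>
    if isHeaderLineB l then ([], l :: ls)
    else
      let p := spanNonHeaderB ls
      (l :: p.1, p.2)

theorem spanNonHeaderB_snd_length_le (ls : List (List Char)) :
    (spanNonHeaderB ls).2.length ≤ ls.length := by
  induction ls with
  | nil => simp [spanNonHeaderB]
  | cons l ls ih =>
    simp only [spanNonHeaderB]
    split
    · simp
    · simpa using Nat.le_succ_of_le ih

-- Source B's outer `while i < n` loop: one segment per header line (header lstripped)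
def segsHB : List (List Char) → List (List (List Char))
  | [] => []
  | h :: ls =>
    (pyLstripItemChars h :: (spanNonHeaderB ls).1) :: segsHB (spanNonHeaderB ls).2
termination_by ls => ls.length
decreasing_by
  exact Nat.lt_succ_of_le (spanNonHeaderB_snd_length_le ls)

-- ' '.join(p for p in seg if p)
def segTextB (seg : List (List Char)) : List Char :=
  PySem.Chars.join [' '] (seg.filter (fun p => p ≠ []))

def extract_mistral_followup_py_alt (content : List String) : List String :=
  let lines := (content.map String.toList).filter (fun l => l ≠ [])
  let segments : List (List (List Char)) :=
    match lines with
    | [] => []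
    | l :: _ =>
      if isHeaderLineB l then segsHB lines
      else (spanNonHeaderB lines).1 :: segsHB (spanNonHeaderB lines).2
  let out := segments.filterMap (fun seg =>
    let t := segTextB seg
    if 15 < PySem.Chars.len t then some (PySem.Chars.strip t) else none)
  (out.take 8).map (fun cs => String.mk cs)

-- ===== PRECONDITION & SPEC =====
def Spec_extract_mistral_followup_py (content : List String) (out : List String) : Prop := out = extract_mistral_followup_py_alt content
instance (content : List String) (out : List String) : Decidable (Spec_extract_mistral_followup_py content out) := by unfold Spec_extract_mistral_followup_py; infer_instance

-- ===== CLAIM (what is proved, stated in full; the proofs are below) =====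
def Claim_equal_extract_mistral_followup_py : Prop := ∀ (content : List String), Dom_extract_mistral_followup_py content → Spec_extract_mistral_followup_py content (extract_mistral_followup_py content)

-- ===== LEMMAS AND PROOFS =====

-- A's loop body on a non-empty line (proof-side copy of the inline lambda in port A)
def stepP (st : List (List Char) × List Char) (line : List Char) : List (List Char) × List Char :=
  let items := st.1
  let cur := st.2
  if isHeaderLineB line then
    ((if cur ≠ [] ∧ 15 < PySem.Chars.len cur then items ++ [PySem.Chars.strip cur] else items),
     pyLstripItemChars line)
  else
    (items, if cur ≠ [] then cur ++ ' ' :: line else line)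

def flushP (cur : List Char) : List (List Char) :=
  if cur ≠ [] ∧ 15 < PySem.Chars.len cur then [PySem.Chars.strip cur] else []

def extendP (cur line : List Char) : List Char :=
  if cur ≠ [] then cur ++ ' ' :: line else line

def keepP (seg : List (List Char)) : Option (List Char) :=
  let t := segTextB seg
  if 15 < PySem.Chars.len t then some (PySem.Chars.strip t) else none

def emitP (t : List Char) : List (List Char) :=
  if 15 < PySem.Chars.len t then [PySem.Chars.strip t] else []

-- the items ++ flush view of stepP
theorem stepP_eq (st : List (List Char) × List Char) (l : List Char) :
    stepP st l =
      if isHeaderLineB l then (st.1 ++ flushP st.2, pyLstripItemChars l)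
      else (st.1, extendP st.2 l) := by
  simp only [stepP, flushP, extendP]
  split
  · split <;> simp
  · rfl

theorem flushP_eq_emitP (c : List Char) : flushP c = emitP c := by
  simp only [flushP, emitP, PySem.Chars.len_eq]
  by_cases h : c = []
  · subst h; simp
  · simp [h]

theorem filterMap_keepP_cons (seg : List (List Char)) (rest : List (List (List Char))) :
    (seg :: rest).filterMap keepP = emitP (segTextB seg) ++ rest.filterMap keepP := by
  by_cases h : 15 < PySem.Chars.len (segTextB seg)
  · simp only [List.filterMap_cons, keepP, emitP, if_pos h]; rfl
  · simp only [List.filterMap_cons, keepP, emitP, if_neg h]; rfl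

-- A's fold over raw content = the same fold, empty lines removed first
theorem foldl_skip_empty (content : List String) (st : List (List Char) × List Char) :
    content.foldl
      (fun (st : List (List Char) × List Char) (line0 : String) =>
        let line := line0.toList
        if line = [] then st else stepP st line) st =
    ((content.map String.toList).filter (fun l => l ≠ [])).foldl stepP st := by
  induction content generalizing st with
  | nil => rfl
  | cons l0 rest ih =>
    by_cases h : l0.toList = []
    · have h1 : (String.toList l0 :: List.map String.toList rest).filter (fun l => l ≠ []) =
          (List.map String.toList rest).filter (fun l => l ≠ []) := by
        rw [List.filter_cons, if_neg (by simp [h])]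
      show List.foldl _ (if l0.toList = [] then st else stepP st l0.toList) rest = _
      rw [if_pos h, List.map_cons, h1, ih st]
    · have h1 : (String.toList l0 :: List.map String.toList rest).filter (fun l => l ≠ []) =
          String.toList l0 :: (List.map String.toList rest).filter (fun l => l ≠ []) := by
        rw [List.filter_cons, if_pos (by simp [h])]
      show List.foldl _ (if l0.toList = [] then st else stepP st l0.toList) rest = _
      rw [if_neg h, List.map_cons, h1, List.foldl_cons, ih (stepP st l0.toList)]

-- accumulator items only grows by appending
theorem foldl_stepP_acc (ls : List (List Char)) (acc : List (List Char)) (cur : List Char) :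
    ls.foldl stepP (acc, cur) =
      (acc ++ (ls.foldl stepP ([], cur)).1, (ls.foldl stepP ([], cur)).2) := by
  induction ls generalizing acc cur with
  | nil => simp
  | cons l ls ih =>
    simp only [List.foldl_cons, stepP_eq]
    split
    · rw [ih (acc ++ flushP cur), ih ([] ++ flushP cur)]
      simp
    · rw [ih acc]

-- a run of non-header lines only extends the current item
theorem foldl_stepP_nonheader (a : List (List Char)) (hh : ∀ l ∈ a, isHeaderLineB l = false)
    (acc : List (List Char)) (cur : List Char) :
    a.foldl stepP (acc, cur) = (acc, a.foldl extendP cur) := by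
  induction a generalizing cur with
  | nil => rfl
  | cons l ls ih =>
    have hl : isHeaderLineB l = false := hh l (by simp)
    rw [List.foldl_cons, stepP_eq, if_neg (by simp [hl]), List.foldl_cons]
    exact ih (fun x hx => hh x (by simp [hx])) _

-- extending a nonempty current item through nonempty lines is ' '.join
theorem foldl_extendP_join (a : List (List Char)) (hne : ∀ l ∈ a, l ≠ []) (cur : List Char)
    (hcur : cur ≠ []) :
    a.foldl extendP cur = PySem.Chars.join [' '] (cur :: a) := by
  induction a generalizing cur with
  | nil => simp [PySem.Chars.join_singleton]
  | cons x xs ih =>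
    have hx : x ≠ [] := hne x (by simp)
    have h1 : extendP cur x = cur ++ ' ' :: x := by simp [extendP, hcur]
    rw [List.foldl_cons, h1, ih (fun l hl => hne l (by simp [hl])) _ (by simp [hcur])]
    cases xs with
    | nil => simp [PySem.Chars.join_singleton, PySem.Chars.join_cons_cons]
    | cons y ys => simp [PySem.Chars.join_cons_cons, List.append_assoc]

theorem foldl_extendP_segText (a : List (List Char)) (hne : ∀ l ∈ a, l ≠ []) (cur : List Char) :
    a.foldl extendP cur = segTextB (cur :: a) := by
  have hfa : a.filter (fun p => p ≠ []) = a := by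
    rw [List.filter_eq_self]; intro x hx; simpa using hne x hx
  by_cases hcur : cur = []
  · subst hcur
    cases a with
    | nil => rfl
    | cons x xs =>
      have hx : x ≠ [] := hne x (by simp)
      have hfxs : xs.filter (fun p => p ≠ []) = xs := by
        rw [List.filter_eq_self]; intro l hl; simpa using hne l (by simp [hl])
      have h1 : extendP [] x = x := by simp [extendP]
      unfold segTextB
      rw [List.filter_cons, if_neg (by simp), List.filter_cons, if_pos (by simpa using hx), hfxs,
        List.foldl_cons, h1]
      exact foldl_extendP_join xs (fun l hl => hne l (by simp [hl])) x hx
  · unfold segTextB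
    rw [List.filter_cons, if_pos (by simpa using hcur), hfa]
    exact foldl_extendP_join a hne cur hcur

-- spanNonHeaderB decomposition facts
theorem spanNonHeaderB_append (ls : List (List Char)) :
    (spanNonHeaderB ls).1 ++ (spanNonHeaderB ls).2 = ls := by
  induction ls with
  | nil => rfl
  | cons l ls ih =>
    simp only [spanNonHeaderB]
    split
    · rfl
    · simpa using ih

theorem spanNonHeaderB_fst_nonheader (ls : List (List Char)) :
    ∀ l ∈ (spanNonHeaderB ls).1, isHeaderLineB l = false := by
  induction ls with
  | nil => simp [spanNonHeaderB]
  | cons l ls ih =>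
    simp only [spanNonHeaderB]
    split
    · simp
    · rename_i h
      intro x hx
      rcases (by simpa using hx) with h1 | h1
      · subst h1; simpa using h
      · exact ih x h1

theorem spanNonHeaderB_snd_headerled (ls : List (List Char)) :
    (spanNonHeaderB ls).2 = [] ∨
      ∃ h t, (spanNonHeaderB ls).2 = h :: t ∧ isHeaderLineB h = true := by
  induction ls with
  | nil => left; rfl
  | cons l ls ih =>
    simp only [spanNonHeaderB]
    split
    · exact Or.inr ⟨l, ls, rfl, by assumption⟩
    · simpa using ih

-- A's core result from the current item cur over a filtered, header-led tail
def outCoreP (cur : List Char) (ls : List (List Char)) : List (List Char) :=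
  (ls.foldl stepP ([], cur)).1 ++ flushP (ls.foldl stepP ([], cur)).2

theorem main_headerled : ∀ (n : ℕ) (ls : List (List Char)), ls.length ≤ n →
    (∀ l ∈ ls, l ≠ []) →
    (ls = [] ∨ ∃ h t, ls = h :: t ∧ isHeaderLineB h = true) →
    ∀ cur, outCoreP cur ls = flushP cur ++ (segsHB ls).filterMap keepP := by
  intro n
  induction n with
  | zero =>
    intro ls hlen _ _ cur
    have : ls = [] := List.eq_nil_of_length_eq_zero (Nat.le_zero.mp hlen)
    subst this
    simp [outCoreP, segsHB]
  | succ n ih =>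
    intro ls hlen hne hled cur
    rcases hled with rfl | ⟨h, t, rfl, hh⟩
    · simp [outCoreP, segsHB]
    · have hspan := spanNonHeaderB_append t
      have hstep : (h :: t).foldl stepP ([], cur) =
          t.foldl stepP (flushP cur, pyLstripItemChars h) := by
        simp [stepP_eq, hh]
      set a := (spanNonHeaderB t).1 with ha
      set b := (spanNonHeaderB t).2 with hb
      have hta : ∀ l ∈ a, l ≠ [] := by
        intro l hl
        exact hne l (by rw [← hspan] at *; simp [List.mem_append, hl])
      have htb : ∀ l ∈ b, l ≠ [] := by
        intro l hl
        exact hne l (by rw [← hspan] at *; simp [List.mem_append, hl])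
      set cur0 := a.foldl extendP (pyLstripItemChars h) with hcur0
      have hfold : t.foldl stepP (flushP cur, pyLstripItemChars h) =
          (flushP cur ++ (b.foldl stepP ([], cur0)).1, (b.foldl stepP ([], cur0)).2) := by
        conv_lhs => rw [← hspan]
        rw [List.foldl_append,
          foldl_stepP_nonheader a (spanNonHeaderB_fst_nonheader t) _ _,
          foldl_stepP_acc]
      have hlenb : b.length ≤ n := by
        have h1 := spanNonHeaderB_snd_length_le t
        rw [← hb] at h1
        have h2 : t.length + 1 ≤ n + 1 := by simpa using hlen
        omega
      have hih := ih b hlenb htb (spanNonHeaderB_snd_headerled t) cur0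
      have hseg : segsHB (h :: t) = (pyLstripItemChars h :: a) :: segsHB b := by
        rw [segsHB]
      rw [outCoreP, hstep, hfold]
      simp only [outCoreP] at hih
      rw [List.append_assoc, hih, hseg, filterMap_keepP_cons]
      have htext : segTextB (pyLstripItemChars h :: a) = cur0 := by
        rw [hcur0, foldl_extendP_segText a hta]
      rw [htext, flushP_eq_emitP cur0]

-- ===== VERDICT (by name: the statement is the Claim_ definition above) =====
theorem extract_mistral_followup_py_spec : Claim_equal_extract_mistral_followup_py := by
  intro content _
  show extract_mistral_followup_py content = extract_mistral_followup_py_alt content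
  unfold extract_mistral_followup_py extract_mistral_followup_py_alt
  simp only []
  have hbody : (fun (st : List (List Char) × List Char) (line0 : String) =>
      let line := line0.toList
      if line = [] then st
      else
        let items := st.1
        let cur := st.2
        if PySem.Chars.startswith line ['-'] || PySem.Chars.startswith line ['•'] ||
             PySem.Chars.startswith line ['*'] ||
           "12345".toList.any (fun ch =>
             PySem.Chars.isdigit ch && PySem.Chars.isIn [ch] (PySem.Chars.slice line none (some 5))) ||
           PySem.Chars.endswith line [':'] ||
           (["referral", "appointment", "follow", "return", "schedule", "monitor"].map
             String.toList).any (fun k => PySem.Chars.isIn k (PySem.Chars.lower line))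
        then
          ((if cur ≠ [] ∧ 15 < PySem.Chars.len cur then items ++ [PySem.Chars.strip cur] else items),
           pyLstripItemChars line)
        else
          (items, if cur ≠ [] then cur ++ ' ' :: line else line)) =
      (fun (st : List (List Char) × List Char) (line0 : String) =>
        let line := line0.toList
        if line = [] then st else stepP st line) := by
    funext st line0
    simp only [stepP, isHeaderLineB]
    rfl
  rw [hbody, foldl_skip_empty]
  set lines := (content.map String.toList).filter (fun l => l ≠ []) with hlines
  have hlne : ∀ l ∈ lines, l ≠ [] := by
    intro l hl
    rw [hlines] at hl
    simpa using (List.of_mem_filter hl)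
  have hcore : (lines.foldl stepP ([], [])).1 ++ flushP (lines.foldl stepP ([], [])).2 =
      (match lines with
        | [] => []
        | l :: _ =>
          if isHeaderLineB l then segsHB lines
          else (spanNonHeaderB lines).1 :: segsHB (spanNonHeaderB lines).2).filterMap keepP := by
    cases hls : lines with
    | nil => simp [flushP]
    | cons l t =>
      by_cases hl : isHeaderLineB l
      · have := main_headerled (l :: t).length (l :: t) le_rfl
          (by rw [← hls]; exact hlne) (Or.inr ⟨l, t, rfl, hl⟩) []
        simp only [outCoreP] at this
        rw [this]
        simp [flushP, hl]
      · -- leading non-header run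
        have hspan := spanNonHeaderB_append (l :: t)
        set a := (spanNonHeaderB (l :: t)).1 with ha
        set b := (spanNonHeaderB (l :: t)).2 with hb
        have hta : ∀ x ∈ a, x ≠ [] := by
          intro x hx
          refine hlne x ?_
          rw [hls, ← hspan]; simp [List.mem_append, hx]
        have htb : ∀ x ∈ b, x ≠ [] := by
          intro x hx
          refine hlne x ?_
          rw [hls, ← hspan]; simp [List.mem_append, hx]
        set cur0 := a.foldl extendP ([] : List Char) with hcur0
        have hfold : (l :: t).foldl stepP ([], []) =
            (([] : List (List Char)) ++ (b.foldl stepP ([], cur0)).1,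
              (b.foldl stepP ([], cur0)).2) := by
          conv_lhs => rw [← hspan]
          rw [List.foldl_append,
            foldl_stepP_nonheader a (spanNonHeaderB_fst_nonheader (l :: t)) _ _,
            foldl_stepP_acc]
          simp
        have hmain := main_headerled b.length b le_rfl htb
          (spanNonHeaderB_snd_headerled (l :: t)) cur0
        simp only [outCoreP] at hmain
        have htext : segTextB a = cur0 := by
          have h1 : segTextB ([] :: a) = segTextB a := by
            simp [segTextB]
          rw [hcur0, foldl_extendP_segText a hta, h1]
        simp only [Bool.not_eq_true] at hl
        simp only [hl, Bool.false_eq_true, if_false]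
        rw [hfold]
        simp only [List.nil_append]
        rw [hmain, filterMap_keepP_cons, htext, flushP_eq_emitP cur0]
  have hA : ∀ st : List (List Char) × List Char,
      (if st.2 ≠ [] ∧ 15 < PySem.Chars.len st.2 then st.1 ++ [PySem.Chars.strip st.2] else st.1) =
        st.1 ++ flushP st.2 := by
    intro st
    simp only [flushP]
    split <;> simp
  rw [hA]
  rw [show (fun x => if 15 < PySem.Chars.len (segTextB x) then some (PySem.Chars.strip (segTextB x))
        else none) = keepP from rfl]
  rw [hcore]
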